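-- pv_equiv track=rewrite | github.com/launcherst/show-me-the-code | 0006/0006.py | match_word
-- ===== SOURCE A (Python) =====
-- import glob,string
--
-- def match_word(line):
-- 	words = []
-- 	word = ''
-- 	for letter in line:
-- 		if letter in string.ascii_letters: word += letter
-- 		else:
-- 			words.append(word)
-- 			word = ''
-- 	return words
-- ===== SOURCE B (Python) =====
-- import re
--
-- def match_word(line):
--     return re.split(r'[^a-zA-Z]', line)[:-1]
-- ===== Notes on version B (the rewrite author's own statement) =====
-- stated objective: idiomatic
-- what changed: Replaced the character-by-character accumulate/flush loop with a single regex split at every non-letter character, dropping the trailing segment (A never appends the final run).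
import Mathlib
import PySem

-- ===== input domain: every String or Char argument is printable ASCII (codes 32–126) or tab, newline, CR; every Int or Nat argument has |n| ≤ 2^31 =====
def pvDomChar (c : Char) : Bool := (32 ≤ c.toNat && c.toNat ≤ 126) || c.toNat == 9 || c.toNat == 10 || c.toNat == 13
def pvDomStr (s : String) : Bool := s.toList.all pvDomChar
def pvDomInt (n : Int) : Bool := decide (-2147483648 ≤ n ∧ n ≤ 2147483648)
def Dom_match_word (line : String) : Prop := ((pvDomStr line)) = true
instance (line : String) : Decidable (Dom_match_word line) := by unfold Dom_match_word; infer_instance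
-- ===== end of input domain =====

-- B replaces A's character-by-character accumulate/flush loop with a regex split
-- at every non-letter character (dropping the trailing segment); idiomatic, same cost.


-- ===== PORT A =====
-- letter in string.ascii_letters
def pvIsAsciiLetter (c : Char) : Bool :=
  "abcdefghijklmnopqrstuvwxyzABCDEFGHIJKLMNOPQRSTUVWXYZ".toList.contains c

-- A's loop: state = (words, word); letters are pushed onto word, any other
-- character flushes word (possibly empty) onto words; word is never flushed at the end.
def match_word (line : String) : List String :=
  (line.toList.foldl
    (fun (st : List String × String) letter =>
      if pvIsAsciiLetter letter then (st.1, st.2.push letter)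
      else (st.1 ++ [st.2], ""))
    ([], "")).1

-- ===== PORT B =====
-- re.split(r'[^a-zA-Z]', line): segments between non-letter delimiters, as
-- (first segment, remaining segments), built right-to-left over the characters.
def pvReSplitNonLetter : List Char → List Char × List (List Char)
  | [] => ([], [])
  | c :: cs =>
      let (h, t) := pvReSplitNonLetter cs
      if pvIsAsciiLetter c then (c :: h, t) else ([], h :: t)

-- [:-1] = dropLast
def match_word_alt (line : String) : List String :=
  let (h, t) := pvReSplitNonLetter line.toList
  ((h :: t).dropLast).map String.ofList

-- ===== PRECONDITION & SPEC =====
def Spec_match_word (line : String) (out : List String) : Prop := out = match_word_alt line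
instance (line : String) (out : List String) : Decidable (Spec_match_word line out) := by unfold Spec_match_word; infer_instance

-- ===== CLAIM (what is proved, stated in full; the proofs are below) =====
def Claim_equal_match_word : Prop := ∀ (line : String), Dom_match_word line → Spec_match_word line (match_word line)

-- ===== LEMMAS AND PROOFS =====

-- Loop invariant: A's fold from state (ws, w) yields ws followed by B's segments
-- of the remaining characters (with w prefixed to the first), last segment dropped.
theorem pv_fold_eq_split (cs : List Char) :
    ∀ (ws : List String) (w : String),
      (cs.foldl
        (fun (st : List String × String) letter =>
          if pvIsAsciiLetter letter then (st.1, st.2.push letter)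
          else (st.1 ++ [st.2], ""))
        (ws, w)).1
      = ws ++ (((w.toList ++ (pvReSplitNonLetter cs).1) :: (pvReSplitNonLetter cs).2).dropLast).map String.ofList := by
  induction cs with
  | nil => intro ws w; simp [pvReSplitNonLetter]
  | cons c cs ih =>
      intro ws w
      by_cases h : pvIsAsciiLetter c = true
      · simp only [List.foldl_cons, h, if_pos, pvReSplitNonLetter]
        rw [ih]
        simp
      · simp only [List.foldl_cons, pvReSplitNonLetter, h]
        rw [ih]
        simp [List.dropLast_cons₂, String.ofList]

-- ===== VERDICT (by name: the statement is the Claim_ definition above) =====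
theorem match_word_spec : Claim_equal_match_word := by
  intro line _
  unfold Spec_match_word match_word match_word_alt
  rw [pv_fold_eq_split]
  simp
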